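-- pv_equiv track=rewrite | github.com/powergee/CompetitiveProgramming | 3학년 1학기/분할정복 세미나/같은 수로 만들기.py | count_add
-- ===== SOURCE A (Python) =====
-- def count_add(nums, prev_max):
--     if len(nums) == 0:
--         return 0
--
--     max_val = max(nums)
--     min_val = min(nums)
--     max_idx = nums.index(max_val)
--
--     if max_val == min_val:
--         return prev_max - max_val
--
--     result = count_add(nums[:max_idx], max_val)
--     result += count_add(nums[max_idx+1:], max_val)
--     result += prev_max - max_val
--     return result
-- ===== SOURCE B (Python) =====
-- def count_add(nums, prev_max):
--     if not nums:
--         return 0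
--     total = prev_max - nums[-1]
--     for prev, cur in zip(nums, nums[1:]):
--         if cur > prev:
--             total += cur - prev
--     return total
-- ===== Notes on version B (the rewrite author's own statement) =====
-- stated objective: faster
-- what changed: Replaced the recursive max-split (max/min/index/slice on every level) by a single linear pass: the answer telescopes to prev_max - nums[-1] plus the sum of positive adjacent differences.
import Mathlib
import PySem

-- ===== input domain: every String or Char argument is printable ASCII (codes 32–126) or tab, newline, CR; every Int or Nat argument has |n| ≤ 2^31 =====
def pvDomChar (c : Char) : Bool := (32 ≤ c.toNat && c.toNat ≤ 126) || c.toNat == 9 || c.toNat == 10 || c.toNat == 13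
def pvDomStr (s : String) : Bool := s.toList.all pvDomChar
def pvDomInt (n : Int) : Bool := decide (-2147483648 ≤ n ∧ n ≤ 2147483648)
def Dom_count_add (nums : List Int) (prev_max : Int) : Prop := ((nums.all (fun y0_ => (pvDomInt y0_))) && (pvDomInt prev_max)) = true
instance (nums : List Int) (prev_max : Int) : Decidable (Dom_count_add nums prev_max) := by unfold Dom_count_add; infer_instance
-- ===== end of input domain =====

-- B replaces A's recursive max-split by one linear pass over adjacent pairs (measured faster).

-- termination helper for the port of A (the recursive calls are on strictly shorter slices)
theorem count_add_idx_lt (nums : List Int) (h : ¬ nums.length = 0) :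
    ((PySem.List.index? nums ((PySem.List.max? nums (fun y => y)).getD 0)).getD 0) < nums.length := by
  rcases hM : PySem.List.max? nums (fun y => y) with _ | M
  · rw [PySem.List.max?_eq_none_iff] at hM; simp [hM] at h
  · have hmem : M ∈ nums := PySem.List.max?_mem hM
    rcases hk : PySem.List.index? nums M with _ | k
    · rw [PySem.List.index?_eq_none_iff] at hk; exact absurd hmem hk
    · obtain ⟨hlt, -, -⟩ := PySem.List.getElem_of_index?_eq_some hk
      rw [PySem.List.index?_eq_idxOf?] at hk
      simp [hk, hlt]

-- ===== PORT A =====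
def count_add (nums : List Int) (prev_max : Int) : Int :=
  if _h : nums.length = 0 then 0
  else
    let max_val := (PySem.List.max? nums (fun y => y)).getD 0
    let min_val := (PySem.List.min? nums (fun y => y)).getD 0
    let max_idx := (PySem.List.index? nums max_val).getD 0
    if max_val = min_val then prev_max - max_val
    else
      count_add (PySem.List.slice nums none (some (max_idx : Int))) max_val
      + count_add (PySem.List.slice nums (some ((max_idx : Int) + 1)) none) max_val
      + (prev_max - max_val)
termination_by nums.length
decreasing_by
  · have hlt := count_add_idx_lt nums _h
    simp only [PySem.List.slice_to_natCast, List.length_take]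
    omega
  · have : ((max_idx : Int) + 1) = ((max_idx + 1 : Nat) : Int) := by push_cast; ring
    rw [this, PySem.List.slice_from_natCast]
    simp only [List.length_drop]
    omega

-- ===== PORT B =====
def count_add_alt (nums : List Int) (prev_max : Int) : Int :=
  match nums with
  | [] => 0
  | _ :: _ =>
    (nums.zip (PySem.List.slice nums (some 1) none)).foldl
      (fun total pc => if pc.2 > pc.1 then total + (pc.2 - pc.1) else total)
      (prev_max - (PySem.List.pyGet? nums (-1)).getD 0)

-- ===== PRECONDITION & SPEC =====
def Spec_count_add (nums : List Int) (prev_max : Int) (out : Int) : Prop := out = count_add_alt nums prev_max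
instance (nums : List Int) (prev_max : Int) (out : Int) : Decidable (Spec_count_add nums prev_max out) := by unfold Spec_count_add; infer_instance

-- ===== CLAIM (what is proved, stated in full; the proofs are below) =====
def Claim_equal_count_add : Prop := ∀ (nums : List Int) (prev_max : Int), Dom_count_add nums prev_max → Spec_count_add nums prev_max (count_add nums prev_max)

-- ===== LEMMAS AND PROOFS =====

/-- sum of positive adjacent differences -/
def pdS : List Int → Int
  | a :: b :: r => (if a < b then b - a else 0) + pdS (b :: r)
  | _ => 0

/-- the closed form both sides are reduced to -/
def G (nums : List Int) (p : Int) : Int :=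
  match nums with
  | [] => 0
  | _ :: _ => p - nums.getLast?.getD 0 + pdS nums

theorem foldl_zip_pdS (l : List Int) :
    ∀ init : Int,
      (l.zip l.tail).foldl
        (fun total pc => if pc.2 > pc.1 then total + (pc.2 - pc.1) else total) init
      = init + pdS l := by
  induction l with
  | nil => intro init; simp [pdS]
  | cons a l ih =>
    intro init
    cases l with
    | nil => simp [pdS]
    | cons b r =>
      show (((a, b) :: (b :: r).zip r).foldl _ _) = _
      have : (b :: r).zip r = (b :: r).zip (b :: r).tail := rfl
      rw [List.foldl_cons, this, ih]
      simp only [pdS, gt_iff_lt]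
      split_ifs with hab <;> ring

theorem alt_eq_G (nums : List Int) (p : Int) : count_add_alt nums p = G nums p := by
  cases nums with
  | nil => rfl
  | cons a l =>
    show ((a :: l).zip (PySem.List.slice (a :: l) (some 1) none)).foldl _ _ = _
    rw [PySem.List.slice_from_one, PySem.List.pyGet?_neg_one]
    rw [foldl_zip_pdS]
    rfl

def pdStep : Option Int → Int → Int
  | none, _ => 0
  | some l, y => if l < y then y - l else 0

theorem pdS_append_cons (xs : List Int) (y : Int) (ys : List Int) :
    pdS (xs ++ y :: ys) = pdS xs + pdStep xs.getLast? y + pdS (y :: ys) := by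
  induction xs with
  | nil => simp [pdS, pdStep]
  | cons a xs ih =>
    cases xs with
    | nil => simp [pdS, pdStep]
    | cons b r =>
      have h1 : (a :: b :: r) ++ y :: ys = a :: ((b :: r) ++ y :: ys) := rfl
      rw [h1]
      show (if a < b then b - a else 0) + pdS ((b :: r) ++ y :: ys) = _
      rw [ih]
      simp only [pdS, List.getLast?_cons_cons]
      ring

theorem pdS_cons_le (y : Int) (ys : List Int) (h : ∀ x ∈ ys, x ≤ y) :
    pdS (y :: ys) = pdS ys := by
  cases ys with
  | nil => rfl
  | cons z r =>
    show (if y < z then z - y else 0) + pdS (z :: r) = pdS (z :: r)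
    have : ¬ y < z := not_lt.mpr (h z (by simp))
    simp [this]

theorem pdStep_eq (l0 y : Int) (h : l0 ≤ y) : pdStep (some l0) y = y - l0 := by
  simp only [pdStep]; split_ifs <;> omega

theorem getLast?_app_cons (xs : List Int) (y : Int) (ys : List Int) :
    (xs ++ y :: ys).getLast? = (y :: ys).getLast? := by
  rw [List.getLast?_append]
  cases h : (y :: ys).getLast? with
  | none => simp [List.getLast?_eq_none_iff] at h
  | some v => rfl

theorem G_cons (a : Int) (l : List Int) (p : Int) :
    G (a :: l) p = p - (a :: l).getLast?.getD 0 + pdS (a :: l) := rfl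

theorem G_split (xs : List Int) (y : Int) (ys : List Int) (p : Int)
    (hxs : ∀ x ∈ xs, x ≤ y) (hys : ∀ x ∈ ys, x ≤ y) :
    G (xs ++ y :: ys) p = (p - y) + G xs y + G ys y := by
  have hG : G (xs ++ y :: ys) p
      = p - (xs ++ y :: ys).getLast?.getD 0 + pdS (xs ++ y :: ys) := by
    obtain ⟨a, l, hxy⟩ := List.exists_cons_of_ne_nil (by simp : xs ++ y :: ys ≠ [])
    rw [hxy]; rfl
  rw [hG, pdS_append_cons, pdS_cons_le y ys hys, getLast?_app_cons]
  have hxspart : pdS xs + pdStep xs.getLast? y = G xs y := by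
    cases xs with
    | nil => rfl
    | cons a t =>
      have hl0 : (a :: t).getLast? = some ((a :: t).getLast (by simp)) :=
        List.getLast?_eq_some_getLast (by simp)
      have hle : (a :: t).getLast (by simp) ≤ y := hxs _ (List.getLast_mem _)
      rw [G_cons, hl0, pdStep_eq _ _ hle]
      simp only [Option.getD_some]; ring
  rw [← hxspart]
  cases ys with
  | nil =>
    show p - (List.getLast? [y]).getD 0 + (pdS xs + pdStep xs.getLast? y + pdS [y])
        = p - y + (pdS xs + pdStep xs.getLast? y) + G [] y
    simp only [List.getLast?_singleton, Option.getD_some, pdS, G]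
    ring
  | cons z r =>
    rw [List.getLast?_cons_cons, G_cons]
    ring

theorem pdS_const (y : Int) : ∀ l : List Int, (∀ x ∈ l, x = y) → pdS l = 0 := by
  intro l
  induction l with
  | nil => intro _; rfl
  | cons a t ih =>
    intro h
    cases t with
    | nil => rfl
    | cons b r =>
      have ha : a = y := h a (by simp)
      have hb : b = y := h b (by simp)
      show (if a < b then b - a else 0) + pdS (b :: r) = 0
      rw [ih (fun x hx => h x (by simp [hx]))]
      simp [ha, hb]

theorem G_const (nums : List Int) (y p : Int) (hne : nums ≠ [])
    (h : ∀ x ∈ nums, x = y) : G nums p = p - y := by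
  cases nums with
  | nil => exact absurd rfl hne
  | cons a t =>
    rw [G_cons, pdS_const y _ h]
    have hl0 : (a :: t).getLast? = some ((a :: t).getLast (by simp)) :=
      List.getLast?_eq_some_getLast (by simp)
    have := h _ (List.getLast_mem (l := a :: t) (by simp))
    rw [hl0]
    simp [this]

theorem count_add_eq_G (nums : List Int) (p : Int) : count_add nums p = G nums p := by
  induction hn : nums.length using Nat.strong_induction_on generalizing nums p with
  | _ n ih =>
  rw [count_add.eq_def]
  by_cases h : nums.length = 0
  · have : nums = [] := List.length_eq_zero_iff.mp h
    simp [this, G]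
  · simp only [h, dite_false]
    rcases hM : PySem.List.max? nums (fun y => y) with _ | M
    · rw [PySem.List.max?_eq_none_iff] at hM; simp [hM] at h
    rcases hmi : PySem.List.min? nums (fun y => y) with _ | mi
    · rw [PySem.List.min?_eq_none_iff] at hmi; simp [hmi] at h
    have hmax : ∀ x ∈ nums, x ≤ M := fun x hx => PySem.List.max?_isMax hM x hx
    have hMmem : M ∈ nums := PySem.List.max?_mem hM
    simp only [Option.getD_some]
    by_cases heq : M = mi
    · simp only [heq, if_true]
      have hall : ∀ x ∈ nums, x = mi := by
        intro x hx
        have h1 : x ≤ M := hmax x hx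
        have h2 : mi ≤ x := PySem.List.min?_isMin hmi x hx
        omega
      rw [G_const nums mi p (by intro hc; simp [hc] at h) hall]
    · simp only [heq, if_false]
      rcases hk : PySem.List.index? nums M with _ | k
      · rw [PySem.List.index?_eq_none_iff] at hk; exact absurd hMmem hk
      obtain ⟨pre, suf, hdec, hlen, -⟩ := (PySem.List.index?_eq_some_iff nums M k).mp hk
      simp only [Option.getD_some]
      have hslice1 : PySem.List.slice nums none (some (k : Int)) = pre := by
        rw [PySem.List.slice_to_natCast, hdec, ← hlen, List.take_left]
      have hcast : ((k : Int) + 1) = ((k + 1 : Nat) : Int) := by push_cast; ring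
      have hslice2 : PySem.List.slice nums (some ((k : Int) + 1)) none = suf := by
        rw [hcast, PySem.List.slice_from_natCast, hdec, ← hlen]
        have h2 : pre ++ M :: suf = (pre ++ [M]) ++ suf := by simp
        have h3 : pre.length + 1 = (pre ++ [M]).length := by simp
        rw [h2, h3, List.drop_left]
      have hlen1 : pre.length < n := by
        have : nums.length = pre.length + suf.length + 1 := by simp [hdec]; omega
        omega
      have hlen2 : suf.length < n := by
        have : nums.length = pre.length + suf.length + 1 := by simp [hdec]; omega
        omega
      rw [hslice1, hslice2, ih _ hlen1 _ _ rfl, ih _ hlen2 _ _ rfl]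
      rw [hdec, G_split pre M suf p
        (fun x hx => hmax x (by rw [hdec]; exact List.mem_append_left _ hx))
        (fun x hx => hmax x (by rw [hdec]; simp [hx]))]
      ring

-- ===== VERDICT (by name: the statement is the Claim_ definition above) =====
theorem count_add_spec : Claim_equal_count_add := by
  intro nums prev_max _
  unfold Spec_count_add
  rw [count_add_eq_G, alt_eq_G]
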